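-- pv_equiv track=rewrite | github.com/KalBia/UWr | Python/lista7/zadanie_4.py | kwadrator
-- ===== SOURCE A (Python) =====
-- def kwadrator(bok):
--     napis = ''
--     zmiana_koloru = 0
--     for i in range(4):
--         for j in range(bok):
--             if zmiana_koloru == 1:
--                 napis += 'c'
--             zmiana_koloru = (zmiana_koloru + 1) % 2
--             napis += 'f'
--         napis += 'r'
--     return napis
-- ===== SOURCE B (Python) =====
-- def kwadrator(bok):
--     n = max(bok, 0)
--     out = []
--     for r in range(4):
--         if (r * n) % 2 == 0:
--             row = 'fcf' * (n // 2) + ('f' if n % 2 else '')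
--         else:
--             row = 'cff' * (n // 2) + ('cf' if n % 2 else '')
--         out.append(row + 'r')
--     return ''.join(out)
-- ===== Notes on version B (the rewrite author's own statement) =====
-- stated objective: faster
-- what changed: B replaces A's per-character toggle loop (which appends one character at a time to a growing string while flipping a parity flag) with whole-row construction by repetition of a fixed block plus an odd-length tail, computing each row's start parity in closed form and joining the rows at the end.
import Mathlib
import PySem

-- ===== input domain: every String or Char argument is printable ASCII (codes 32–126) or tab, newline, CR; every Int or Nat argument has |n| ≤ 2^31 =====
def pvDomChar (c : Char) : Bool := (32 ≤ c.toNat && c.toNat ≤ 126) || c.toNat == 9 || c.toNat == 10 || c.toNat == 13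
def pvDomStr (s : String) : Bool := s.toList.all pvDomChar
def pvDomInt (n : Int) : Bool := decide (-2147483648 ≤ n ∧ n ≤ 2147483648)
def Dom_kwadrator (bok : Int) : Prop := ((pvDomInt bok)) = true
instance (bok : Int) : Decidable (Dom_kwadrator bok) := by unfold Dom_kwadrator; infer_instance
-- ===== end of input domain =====

-- B builds each of the 4 rows by repeating a 3-char block instead of A's char-by-char toggle loop;
-- return-value equivalence only (no mutation involved).

-- ===== PORT A =====
-- inner loop body: 'if zmiana_koloru == 1: napis += "c"; zmiana_koloru = (zmiana_koloru+1)%2; napis += "f"'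
def pvInnerStep (st : List Char × Int) (_ : Int) : List Char × Int :=
  let napis := if st.2 == 1 then st.1 ++ ['c'] else st.1
  let z := PySem.Int.mod (st.2 + 1) 2
  (napis ++ ['f'], z)

def kwadrator (bok : Int) : String :=
  let res := (PySem.List.pyRange 0 4 1).foldl (fun st _ =>
    let st' := (PySem.List.pyRange 0 bok 1).foldl pvInnerStep st
    (st'.1 ++ ['r'], st'.2)) ([], 0)
  String.ofList res.1

-- ===== PORT B =====
def kwadrator_alt (bok : Int) : String :=
  let n := max bok 0
  let out := (PySem.List.pyRange 0 4 1).foldl (fun acc r =>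
    let row := if PySem.Int.mod (r * n) 2 == 0 then
        PySem.List.pyRepeat ['f','c','f'] (PySem.Int.floordiv n 2) ++
          (if PySem.Int.mod n 2 == 0 then [] else ['f'])
      else
        PySem.List.pyRepeat ['c','f','f'] (PySem.Int.floordiv n 2) ++
          (if PySem.Int.mod n 2 == 0 then [] else ['c','f'])
    acc ++ [row ++ ['r']]) ([] : List (List Char))
  String.ofList (PySem.Chars.join [] out)

-- ===== PRECONDITION & SPEC =====
def Spec_kwadrator (bok : Int) (out : String) : Prop := out = kwadrator_alt bok
instance (bok : Int) (out : String) : Decidable (Spec_kwadrator bok out) := by unfold Spec_kwadrator; infer_instance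

-- ===== CLAIM (what is proved, stated in full; the proofs are below) =====
def Claim_equal_kwadrator : Prop := ∀ (bok : Int), Dom_kwadrator bok → Spec_kwadrator bok (kwadrator bok)

-- ===== LEMMAS AND PROOFS =====

/-- the characters A's inner loop emits from parity `b` in `n` iterations -/
def pvChars : Bool → Nat → List Char
  | _, 0 => []
  | false, n+1 => 'f' :: pvChars true n
  | true,  n+1 => 'c' :: 'f' :: pvChars false n

theorem pvInner_loop (l : List Int) : ∀ (s : List Char) (b : Bool),
    l.foldl pvInnerStep (s, if b then (1:Int) else 0) =
      (s ++ pvChars b l.length, if xor b (decide (l.length % 2 = 1)) then (1:Int) else 0) := by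
  induction l with
  | nil => intro s b; simp [pvChars]
  | cons x t ih =>
    intro s b
    have hstep : pvInnerStep (s, if b then (1:Int) else 0) x =
        ((if b then s ++ ['c'] else s) ++ ['f'], if !b then (1:Int) else 0) := by
      cases b <;> simp [pvInnerStep]
    have hpar : (xor (!b) (decide (t.length % 2 = 1))) =
        (xor b (decide ((t.length + 1) % 2 = 1))) := by
      have h : (t.length + 1) % 2 = 1 ↔ ¬ (t.length % 2 = 1) := by omega
      rcases Nat.mod_two_eq_zero_or_one t.length with h'|h' <;> cases b <;> simp [h, h']
    have hchars : (if b then s ++ ['c'] else s) ++ ['f'] ++ pvChars (!b) t.length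
        = s ++ pvChars b (t.length + 1) := by
      cases b <;> simp [pvChars]
    calc (x :: t).foldl pvInnerStep (s, if b then (1:Int) else 0)
        = t.foldl pvInnerStep ((if b then s ++ ['c'] else s) ++ ['f'], if !b then (1:Int) else 0) := by
          rw [List.foldl_cons, hstep]
      _ = (s ++ pvChars b (t.length + 1),
            if xor b (decide ((t.length + 1) % 2 = 1)) then (1:Int) else 0) := by
          rw [ih]; rw [hchars, hpar]
      _ = _ := rfl

theorem pv_rot_f (k : Nat) :
    'f' :: (List.replicate k ['c','f','f']).flatten
      = (List.replicate k ['f','c','f']).flatten ++ ['f'] := by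
  induction k with
  | zero => simp
  | succ k ih => simp [List.replicate_succ] at ih ⊢; exact ih

theorem pv_rot_cf (k : Nat) :
    'c' :: 'f' :: (List.replicate k ['f','c','f']).flatten
      = (List.replicate k ['c','f','f']).flatten ++ ['c','f'] := by
  induction k with
  | zero => simp
  | succ k ih => simp [List.replicate_succ] at ih ⊢; exact ih

theorem pvChars_even (k : Nat) :
    pvChars false (2*k) = (List.replicate k ['f','c','f']).flatten ∧
    pvChars true (2*k) = (List.replicate k ['c','f','f']).flatten := by
  induction k with
  | zero => simp [pvChars]
  | succ k ih =>
    have h2 : 2 * (k+1) = 2*k + 1 + 1 := by ring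
    rw [h2]
    constructor
    · show pvChars false (2*k+1+1) = _
      simp [pvChars, List.replicate_succ, ih.1]
    · show pvChars true (2*k+1+1) = _
      simp [pvChars, List.replicate_succ, ih.2]

theorem pvChars_odd (k : Nat) :
    pvChars false (2*k+1) = (List.replicate k ['f','c','f']).flatten ++ ['f'] ∧
    pvChars true (2*k+1) = (List.replicate k ['c','f','f']).flatten ++ ['c','f'] := by
  constructor
  · show pvChars false (2*k+1) = _
    rw [show (2*k+1 = 2*k + 1) from rfl]
    simp [pvChars, (pvChars_even k).2, pv_rot_f]
  · rw [show (2*k+1 = 2*k + 1) from rfl]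
    simp [pvChars, (pvChars_even k).1, pv_rot_cf]

-- ===== VERDICT (by name: the statement is the Claim_ definition above) =====
theorem kwadrator_spec : Claim_equal_kwadrator := by
  intro bok _
  show kwadrator bok = kwadrator_alt bok
  have hN : max bok 0 = ((bok.toNat : Nat) : Int) := (Int.ofNat_toNat bok).symm
  set N := bok.toNat with hNdef
  set l := PySem.List.pyRange 0 bok 1 with hl
  have hlen : l.length = N := by
    simp [hl, PySem.List.length_pyRange_one]; rfl
  have hrange4 : PySem.List.pyRange 0 4 1 = [0,1,2,3] := by decide
  have c0 : PySem.Int.mod (0 * ((N:Nat):Int)) 2 = 0 := by simp [PySem.Int.mod]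
  have c1 : PySem.Int.mod (1 * ((N:Nat):Int)) 2 = ((N % 2 : Nat) : Int) := by
    simp
  have c2 : PySem.Int.mod (2 * ((N:Nat):Int)) 2 = 0 := by
    have h := PySem.Int.mod_natCast (2*N) 2
    have h2 : (2*N) % 2 = 0 := by omega
    rw [h2] at h
    push_cast at h ⊢
    exact h
  have c3 : PySem.Int.mod (3 * ((N:Nat):Int)) 2 = ((N % 2 : Nat) : Int) := by
    have h := PySem.Int.mod_natCast (3*N) 2
    have h2 : (3*N) % 2 = N % 2 := by omega
    rw [h2] at h
    push_cast at h ⊢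
    exact h
  have cf : PySem.Int.floordiv ((N:Nat):Int) 2 = ((N / 2 : Nat) : Int) := by
    simp
  have crep : ∀ xs : List Char, PySem.List.pyRepeat xs ((N / 2 : Nat) : Int)
      = (List.replicate (N/2) xs).flatten := by
    intro xs
    show (List.replicate ((N / 2 : Nat) : Int).toNat xs).flatten = _
    rw [Int.toNat_natCast]
  obtain ⟨k, hk⟩ : ∃ k, N = 2*k ∨ N = 2*k+1 := ⟨N/2, by omega⟩
  rcases hk with hk | hk
  · have hdiv : N / 2 = k := by omega
    have hmod : N % 2 = 0 := by omega
    have hgen0 : ∀ s : List Char, List.foldl pvInnerStep (s, (0:Int)) l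
        = (s ++ pvChars false N, 0) := by
      intro s
      simpa [hlen, hmod] using pvInner_loop l s false
    unfold kwadrator kwadrator_alt
    rw [hN]
    simp only [hrange4, List.foldl_cons, List.foldl_nil, ← hl, hgen0,
      c0, c1, c2, c3, cf, crep]
    simp only [hmod, hdiv]
    simp [PySem.Chars.join, List.intercalate, List.intersperse,
      (pvChars_even k).1, hk]
  · have hdiv : N / 2 = k := by omega
    have hmod : N % 2 = 1 := by omega
    have hgen0 : ∀ s : List Char, List.foldl pvInnerStep (s, (0:Int)) l
        = (s ++ pvChars false N, 1) := by
      intro s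
      simpa [hlen, hmod] using pvInner_loop l s false
    have hgen1 : ∀ s : List Char, List.foldl pvInnerStep (s, (1:Int)) l
        = (s ++ pvChars true N, 0) := by
      intro s
      simpa [hlen, hmod] using pvInner_loop l s true
    unfold kwadrator kwadrator_alt
    rw [hN]
    simp only [hrange4, List.foldl_cons, List.foldl_nil, ← hl, hgen0, hgen1,
      c0, c1, c2, c3, cf, crep]
    simp only [hmod, hdiv]
    simp [PySem.Chars.join, List.intercalate, List.intersperse,
      (pvChars_odd k).1, (pvChars_odd k).2, hk]
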